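-- pv_equiv track=rewrite | github.com/GijimaGarikai/Advent-Of-Code | Day5/main.py | count
-- ===== SOURCE A (Python) =====
-- def count(rows):
--     ans = []
--     cur = []
--     # go through the data and put all
--     # related lines into a single array
--     # then add that array to a final answer array
--     # that has the data split by stage
--     for line in rows:
--         if not line:
--             ans.append(cur)
--             cur = []
--         elif line[0].isalpha():
--              cur = []
--         else:
--             cur.append(line)
--     ans.append(cur)
--     return ans
-- ===== SOURCE B (Python) =====
-- def count(rows):
--     # Two-pass decomposition: first split into blank-delimited segments,
--     # then take each segment's suffix after its last alpha-starting line.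
--     segs = []
--     cur = []
--     for line in rows:
--         if line:
--             cur.append(line)
--         else:
--             segs.append(cur)
--             cur = []
--     segs.append(cur)
--     res = []
--     for seg in segs:
--         i = len(seg)
--         while i > 0 and not seg[i - 1][0].isalpha():
--             i -= 1
--         res.append(seg[i:])
--     return res
-- ===== Notes on version B (the rewrite author's own statement) =====
-- stated objective: alternative
-- what changed: A's single fused loop that resets the current group on every alpha-starting line is replaced by a two-pass decomposition: split the rows into blank-delimited segments, then for each segment take the suffix after its last alpha-starting line via a backward scan.
import Mathlib
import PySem

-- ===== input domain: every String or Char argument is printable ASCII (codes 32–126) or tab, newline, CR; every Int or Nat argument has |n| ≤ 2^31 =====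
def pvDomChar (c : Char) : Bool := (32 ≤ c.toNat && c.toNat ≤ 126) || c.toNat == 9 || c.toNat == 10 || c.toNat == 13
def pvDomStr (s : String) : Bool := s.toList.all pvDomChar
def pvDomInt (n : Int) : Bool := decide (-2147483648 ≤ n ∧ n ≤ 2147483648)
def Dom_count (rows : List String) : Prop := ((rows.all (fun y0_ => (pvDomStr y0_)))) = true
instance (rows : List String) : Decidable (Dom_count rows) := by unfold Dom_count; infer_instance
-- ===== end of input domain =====

-- B replaces A's fused loop (which rebuilds/resets the current group on every alpha line)
-- by a two-pass decomposition: split on blank lines, then per segment take the suffix after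
-- the last alpha-starting line (backward scan). Objective: alternative decomposition.

-- shared helper: `line[0].isalpha()` (both Pythons apply it only to nonempty lines)
def alphaFirst (s : String) : Bool :=
  match PySem.Str.pyGet? s 0 with
  | some c => PySem.Chars.isalpha c
  | none => false

-- ===== PORT A =====
def count (rows : List String) : List (List String) :=
  let st := rows.foldl
    (fun (st : List (List String) × List String) line =>
      if line = "" then (st.1 ++ [st.2], ([] : List String))
      else if alphaFirst line then (st.1, ([] : List String))
      else (st.1, st.2 ++ [line]))
    ([], [])
  st.1 ++ [st.2]

-- ===== PORT B =====
-- the while loop `while i > 0 and not seg[i-1][0].isalpha(): i -= 1`, returning the final i;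
-- every index handed to getD is < seg.length, so the default is never read
def suffixStart (seg : List String) : Nat → Nat
  | 0 => 0
  | i + 1 => if alphaFirst (seg.getD i "") then i + 1 else suffixStart seg i

def count_alt (rows : List String) : List (List String) :=
  let st := rows.foldl
    (fun (st : List (List String) × List String) line =>
      if line = "" then (st.1 ++ [st.2], ([] : List String))
      else (st.1, st.2 ++ [line]))
    ([], [])
  let segs := st.1 ++ [st.2]
  segs.foldl (fun res seg => res ++ [seg.drop (suffixStart seg seg.length)]) []

-- ===== PRECONDITION & SPEC =====
def Spec_count (rows : List String) (out : List (List String)) : Prop := out = count_alt rows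
instance (rows : List String) (out : List (List String)) : Decidable (Spec_count rows out) := by unfold Spec_count; infer_instance

-- ===== CLAIM (what is proved, stated in full; the proofs are below) =====
def Claim_equal_count : Prop := ∀ (rows : List String), Dom_count rows → Spec_count rows (count rows)

-- ===== LEMMAS AND PROOFS =====

-- A's `cur` as a function of the raw (blank-free) lines of the current segment
def tailA (seg : List String) : List String :=
  seg.foldl (fun acc l => if alphaFirst l then [] else acc ++ [l]) []

theorem tailA_append_singleton (seg : List String) (l : String) :
    tailA (seg ++ [l]) = if alphaFirst l then [] else tailA seg ++ [l] := by
  simp [tailA]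

theorem suffixStart_le (seg : List String) (i : Nat) : suffixStart seg i ≤ i := by
  induction i with
  | zero => simp [suffixStart]
  | succ n ih => simp only [suffixStart]; split <;> omega

theorem suffixStart_append (xs : List String) (x : String) (i : Nat) (h : i ≤ xs.length) :
    suffixStart (xs ++ [x]) i = suffixStart xs i := by
  induction i with
  | zero => rfl
  | succ n ih =>
    simp only [suffixStart]
    rw [List.getD, List.getElem?_append_left (by omega), ← List.getD]
    rw [ih (by omega)]

theorem drop_suffixStart_eq_tailA (seg : List String) :
    seg.drop (suffixStart seg seg.length) = tailA seg := by
  induction seg using List.reverseRecOn with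
  | nil => rfl
  | append_singleton xs x ih =>
    rw [tailA_append_singleton]
    have hlen : (xs ++ [x]).length = xs.length + 1 := by simp
    rw [hlen]
    simp only [suffixStart]
    have hx : (xs ++ [x]).getD xs.length "" = x := by
      simp [List.getD]
    rw [hx]
    by_cases ha : alphaFirst x
    · simp [ha]
    · simp only [ha, Bool.false_eq_true, if_false]
      rw [suffixStart_append xs x xs.length (le_refl _)]
      rw [List.drop_append_of_le_length (suffixStart_le xs xs.length), ih]

-- the fused loop of A tracks (map tailA ∘ segments, tailA current-segment) of B's split loop
theorem fuse (rows : List String) (segs : List (List String)) (cur : List String) :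
    rows.foldl
      (fun (st : List (List String) × List String) line =>
        if line = "" then (st.1 ++ [st.2], ([] : List String))
        else if alphaFirst line then (st.1, ([] : List String))
        else (st.1, st.2 ++ [line]))
      (segs.map tailA, tailA cur)
    = ((rows.foldl
        (fun (st : List (List String) × List String) line =>
          if line = "" then (st.1 ++ [st.2], ([] : List String))
          else (st.1, st.2 ++ [line]))
        (segs, cur)).1.map tailA,
       tailA ((rows.foldl
        (fun (st : List (List String) × List String) line =>
          if line = "" then (st.1 ++ [st.2], ([] : List String))
          else (st.1, st.2 ++ [line]))
        (segs, cur)).2)) := by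
  induction rows generalizing segs cur with
  | nil => rfl
  | cons l t ih =>
    simp only [List.foldl_cons]
    by_cases hl : l = ""
    · simp only [hl, reduceIte]
      have : (segs.map tailA ++ [tailA cur], ([] : List String))
          = ((segs ++ [cur]).map tailA, tailA []) := by simp [tailA]
      rw [this, ih]
    · simp only [if_neg hl]
      by_cases ha : alphaFirst l
      · simp only [ha, reduceIte]
        have : ((segs.map tailA, ([] : List String)) : List (List String) × List String)
            = (segs.map tailA, tailA (cur ++ [l])) := by
          rw [tailA_append_singleton]; simp [ha]
        rw [this, ih]
      · simp only [ha, Bool.false_eq_true, reduceIte]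
        have : (segs.map tailA, tailA cur ++ [l]) = (segs.map tailA, tailA (cur ++ [l])) := by
          rw [tailA_append_singleton]; simp [ha]
        rw [this, ih]

-- ===== VERDICT (by name: the statement is the Claim_ definition above) =====
theorem count_spec : Claim_equal_count := by
  intro rows _
  unfold Spec_count count count_alt
  have h := fuse rows [] []
  simp only [List.map_nil, tailA, List.foldl_nil] at h
  rw [h]
  rw [PySem.List.foldl_append_singleton_eq_map]
  cases rows.foldl
      (fun (st : List (List String) × List String) line =>
        if line = "" then (st.1 ++ [st.2], ([] : List String))
        else (st.1, st.2 ++ [line])) ([], []) with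
  | mk s c =>
    have hfn : (fun seg => List.drop (suffixStart seg seg.length) seg) = tailA := by
      funext seg; exact drop_suffixStart_eq_tailA seg
    simp only [hfn, List.nil_append, List.map_append, List.map_cons, List.map_nil, tailA]
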